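-- pv_equiv track=rewrite | github.com/eui20n/Algorithm_SCH | 10주차/그리디/모험가길드.py | guild
-- ===== SOURCE A (Python) =====
-- def guild(arr):
--     adventurer = {}
--     result = 0
--
--     for idx in arr:
--         if idx not in adventurer.keys():
--             adventurer[idx] = 1
--         else:
--             adventurer[idx] += 1
--
--     for key in adventurer.keys():
--         if adventurer[key] >= key:
--             result = max(result, key)
--
--     return result
-- ===== SOURCE B (Python) =====
-- def guild(arr):
--     s = sorted(arr)
--     result = 0
--     i = 0
--     n = len(s)
--     while i < n:
--         j = i
--         while j < n and s[j] == s[i]: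
--             j += 1
--         v = s[i]
--         if j - i >= v:
--             result = max(result, v)
--         i = j
--     return result
-- ===== Notes on version B (the rewrite author's own statement) =====
-- stated objective: alternative
-- what changed: B sorts a copy of arr and scans runs of equal values in one pass, taking the max value whose run length meets it, instead of building a frequency dict and rescanning its keys.
import Mathlib
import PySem

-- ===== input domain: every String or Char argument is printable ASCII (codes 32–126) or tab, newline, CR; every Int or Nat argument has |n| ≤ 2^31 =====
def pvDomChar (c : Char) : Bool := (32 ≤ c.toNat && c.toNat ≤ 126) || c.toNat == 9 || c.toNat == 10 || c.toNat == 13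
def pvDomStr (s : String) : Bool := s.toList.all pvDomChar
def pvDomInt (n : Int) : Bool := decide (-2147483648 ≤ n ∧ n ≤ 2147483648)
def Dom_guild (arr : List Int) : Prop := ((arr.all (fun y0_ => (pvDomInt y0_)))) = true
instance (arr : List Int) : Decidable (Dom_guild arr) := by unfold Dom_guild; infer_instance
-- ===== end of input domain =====

-- B counts by sorting a copy and scanning runs of equal values, instead of A's frequency dict; alternative decomposition, same result.

-- ===== PORT A =====
def guild (arr : List Int) : Int :=
  let adventurer : PySem.Dict Int Int :=
    arr.foldl (fun d idx =>
      if d.contains idx = false then d.insert idx 1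
      else d.modify idx 0 (· + 1)) PySem.Dict.empty
  adventurer.keys.foldl (fun result key =>
    if adventurer.getD key 0 ≥ key then max result key else result) 0

-- ===== PORT B =====
-- inner while loop 'j += 1 while s[j] == s[i]' = takeWhile/dropWhile of the run at the head
def guildRuns : List Int → Int → Int
  | [], result => result
  | v :: rest, result =>
    let cnt : Int := 1 + (rest.takeWhile (· == v)).length
    guildRuns (rest.dropWhile (· == v))
      (if cnt ≥ v then max result v else result)
termination_by s _ => s.length
decreasing_by
  simp only [List.length_cons]
  exact Nat.lt_succ_of_le (List.length_dropWhile_le _ _)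

def guild_alt (arr : List Int) : Int :=
  guildRuns (PySem.List.sorted arr (fun x => x) false) 0

-- ===== PRECONDITION & SPEC =====
def Spec_guild (arr : List Int) (out : Int) : Prop := out = guild_alt arr
instance (arr : List Int) (out : Int) : Decidable (Spec_guild arr out) := by unfold Spec_guild; infer_instance

-- ===== CLAIM (what is proved, stated in full; the proofs are below) =====
def Claim_equal_guild : Prop := ∀ (arr : List Int), Dom_guild arr → Spec_guild arr (guild arr)

-- ===== LEMMAS AND PROOFS =====

-- both programs reduce to this fold over a list of distinct values, with cnt the multiplicity function
def guildFold (cnt : Int → Int) (l : List Int) (r : Int) : Int :=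
  l.foldl (fun r v => if cnt v ≥ v then max r v else r) r

-- the step of guildFold is left-commutative, so the fold is permutation-invariant
theorem guildFold_perm (cnt : Int → Int) {l l' : List Int} (h : l.Perm l') (r : Int) :
    guildFold cnt l r = guildFold cnt l' r := by
  unfold guildFold
  letI : RightCommutative (fun (r v : Int) => if cnt v ≥ v then max r v else r) :=
    ⟨by intro a x y; split_ifs <;> simp [max_comm, max_left_comm]⟩
  exact h.foldl_eq r

theorem guild_eq_fold (arr : List Int) :
    guild arr = guildFold (fun v => (arr.count v : Int)) (PySem.List.dedup arr) 0 := by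
  unfold guild guildFold
  have hstep : arr.foldl (fun d idx =>
      if d.contains idx = false then d.insert idx 1
      else d.modify idx 0 (· + 1)) PySem.Dict.empty = PySem.Dict.counter arr := by
    rw [PySem.Dict.counter_eq_foldl]
    apply PySem.List.foldl_congr_mem
    intro d idx _
    by_cases h : d.contains idx = false
    · simp [PySem.Dict.insert, PySem.Dict.modify, h, PySem.Dict.getD_of_not_contains d 0 h]
    · simp [h]
  simp only [hstep, PySem.Dict.keys_counter, ← PySem.List.dedup_eq_ofList]
  apply PySem.List.foldl_congr_mem
  intro acc key _
  rw [PySem.Dict.getD_counter]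

theorem guildRuns_eq_fold_aux : ∀ (n : Nat) (s : List Int), s.length ≤ n →
    s.Pairwise (· ≤ ·) → ∀ r : Int,
    ∃ L : List Int, L.Nodup ∧ (∀ x, x ∈ L ↔ x ∈ s) ∧
      guildRuns s r = guildFold (fun v => (s.count v : Int)) L r := by
  intro n
  induction n with
  | zero =>
    intro s hlen _ r
    have : s = [] := List.eq_nil_of_length_eq_zero (Nat.le_zero.mp hlen)
    subst this
    exact ⟨[], List.nodup_nil, by simp, by simp [guildRuns, guildFold]⟩
  | succ m ih =>
    intro s hlen hs r
    match s with
    | [] => exact ⟨[], List.nodup_nil, by simp, by simp [guildRuns, guildFold]⟩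
    | v :: rest =>
      have hpw_rest : rest.Pairwise (· ≤ ·) := hs.of_cons
      have hv_le : ∀ x ∈ rest, v ≤ x := fun x hx => List.rel_of_pairwise_cons hs hx
      set t := rest.takeWhile (· == v) with ht
      set rest' := rest.dropWhile (· == v) with hr'
      have hsplit : t ++ rest' = rest := List.takeWhile_append_dropWhile
      have ht_all : ∀ x ∈ t, x = v := by
        intro x hx
        have := List.mem_takeWhile_imp hx
        exact eq_of_beq this
      have hpw' : rest'.Pairwise (· ≤ ·) :=
        hpw_rest.sublist (List.dropWhile_sublist _)
      have hv_notmem : v ∉ rest' := by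
        intro hmem
        obtain ⟨h, tt, hrr⟩ : ∃ h tt, rest' = h :: tt :=
          List.exists_cons_of_ne_nil (by intro hE; rw [hE] at hmem; simp at hmem)
        have hh_ne' : h ≠ v := by
          have hhd := List.head?_dropWhile_not (fun x => x == v) rest
          rw [← hr', hrr] at hhd
          simpa using hhd
        have hh_mem : h ∈ rest := by rw [← hsplit, hrr]; simp
        have hvh : v ≤ h := hv_le h hh_mem
        rw [hrr] at hmem
        rcases List.mem_cons.mp hmem with h1 | h1
        · exact hh_ne' h1.symm
        · have hpw'' := hpw'
          rw [hrr] at hpw''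
          exact hh_ne' (le_antisymm (List.rel_of_pairwise_cons hpw'' h1) hvh)
      have hcount_t : t.count v = t.length := by
        rw [List.count_eq_length]
        intro x hx
        exact (ht_all x hx).symm
      have hcount_r' : rest'.count v = 0 := List.count_eq_zero.mpr hv_notmem
      have hcount_v : (v :: rest).count v = 1 + t.length := by
        rw [List.count_cons_self, ← hsplit, List.count_append, hcount_t, hcount_r']
        omega
      have hcount_ne : ∀ x, x ≠ v → (v :: rest).count x = rest'.count x := by
        intro x hx
        have h0 : t.count x = 0 := by
          rw [List.count_eq_zero]
          intro hmem
          exact hx (ht_all x hmem)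
        rw [← hsplit]
        simp [List.count_append, h0, Ne.symm hx]
      have hlen' : rest'.length ≤ m := by
        have h1 : rest'.length ≤ rest.length := List.length_dropWhile_le _ _
        have h2 : rest.length + 1 ≤ m + 1 := by simpa using hlen
        omega
      obtain ⟨L', hnd', hmem', heq'⟩ := ih rest' hlen' hpw'
        (if (1 + (t.length : Int)) ≥ v then max r v else r)
      refine ⟨v :: L', ?_, ?_, ?_⟩
      · exact List.nodup_cons.mpr ⟨fun h => hv_notmem ((hmem' v).mp h), hnd'⟩
      · intro x
        simp only [List.mem_cons, hmem' x]
        constructor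
        · rintro (h1 | h1)
          · exact Or.inl h1
          · right; rw [← hsplit]; exact List.mem_append_right _ h1
        · rintro (h1 | h1)
          · exact Or.inl h1
          · rw [← hsplit] at h1
            rcases List.mem_append.mp h1 with h2 | h2
            · exact Or.inl (ht_all x h2)
            · exact Or.inr h2
      · show guildRuns (v :: rest) r = _
        rw [guildRuns]
        rw [heq']
        unfold guildFold
        rw [List.foldl_cons]
        have hacc : (if ((((v :: rest).count v : Nat) : Int)) ≥ v then max r v else r)
            = (if (1 + (t.length : Int)) ≥ v then max r v else r) := by
          rw [hcount_v]; push_cast; ring_nf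
        rw [hacc]
        apply PySem.List.foldl_congr_mem
        intro acc x hx
        have hx_ne : x ≠ v := by
          intro h; exact hv_notmem (h ▸ (hmem' x).mp hx)
        simp only [hcount_ne x hx_ne]

theorem guildRuns_eq_fold (s : List Int) (hs : s.Pairwise (· ≤ ·)) (r : Int) :
    ∃ L : List Int, L.Nodup ∧ (∀ x, x ∈ L ↔ x ∈ s) ∧
      guildRuns s r = guildFold (fun v => (s.count v : Int)) L r :=
  guildRuns_eq_fold_aux s.length s le_rfl hs r

-- ===== VERDICT (by name: the statement is the Claim_ definition above) =====
theorem guild_spec : Claim_equal_guild := by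
  intro arr _
  unfold Spec_guild guild_alt
  set s := PySem.List.sorted arr (fun x => x) false with hs
  have hperm : s.Perm arr := PySem.List.sorted_perm arr _ _
  have hpw : s.Pairwise (· ≤ ·) := PySem.List.sorted_pairwise arr (fun x => x)
  obtain ⟨L, hnd, hmem, heq⟩ := guildRuns_eq_fold s hpw 0
  rw [guild_eq_fold, heq]
  have hcnt : ∀ r : Int, guildFold (fun v => (s.count v : Int)) L r
      = guildFold (fun v => (arr.count v : Int)) L r := by
    intro r
    unfold guildFold
    apply PySem.List.foldl_congr_mem
    intro acc x _
    simp only [hperm.count_eq]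
  rw [hcnt]
  have hLperm : (PySem.List.dedup arr).Perm L := by
    rw [List.perm_ext_iff_of_nodup (PySem.List.nodup_dedup arr) hnd]
    intro x
    rw [PySem.List.mem_dedup, hmem, hperm.mem_iff]
  exact guildFold_perm _ hLperm 0
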